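-- pv_equiv track=rewrite | github.com/rithwikshetty/assistant | backend/app/chat/services/stream_finalizer.py | _resolve_model_from_raw
-- ===== SOURCE A (Python) =====
-- from typing import Any, Dict, List, Optional, Tuple
--
-- def _resolve_model_from_raw(raw_responses: List[Dict[str, Any]], fallback_model: str) -> str:
--     for raw in reversed(raw_responses or []):
--         if not isinstance(raw, dict):
--             continue
--         candidate = raw.get("model")
--         if isinstance(candidate, str) and candidate.strip():
--             return candidate.strip()
--     return fallback_model
-- ===== SOURCE B (Python) =====
-- from typing import Any, Dict, List, Optional, Tuple
--
-- def _resolve_model_from_raw(raw_responses: List[Dict[str, Any]], fallback_model: str) -> str: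
--     candidates = [m.strip()
--                   for raw in (raw_responses or []) if isinstance(raw, dict)
--                   for m in [raw.get("model")] if isinstance(m, str) and m.strip()]
--     return candidates[-1] if candidates else fallback_model
-- ===== Notes on version B (the rewrite author's own statement) =====
-- stated objective: alternative
-- what changed: Instead of scanning the reversed list with an early return, B first builds the list of all valid stripped model strings in one comprehension and then returns its last element (or the fallback if the list is empty).
import Mathlib
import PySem

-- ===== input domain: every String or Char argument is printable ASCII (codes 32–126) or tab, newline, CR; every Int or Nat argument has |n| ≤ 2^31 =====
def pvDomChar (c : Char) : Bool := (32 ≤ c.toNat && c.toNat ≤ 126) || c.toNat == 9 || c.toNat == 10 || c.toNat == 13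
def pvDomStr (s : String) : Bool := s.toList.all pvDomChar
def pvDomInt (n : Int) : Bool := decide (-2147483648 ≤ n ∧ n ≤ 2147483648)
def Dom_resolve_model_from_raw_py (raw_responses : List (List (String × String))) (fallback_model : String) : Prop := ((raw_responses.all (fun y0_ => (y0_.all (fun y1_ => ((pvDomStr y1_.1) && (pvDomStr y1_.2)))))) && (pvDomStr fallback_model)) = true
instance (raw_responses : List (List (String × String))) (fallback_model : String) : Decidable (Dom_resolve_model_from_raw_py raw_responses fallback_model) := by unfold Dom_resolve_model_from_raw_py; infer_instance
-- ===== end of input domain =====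

-- B replaces A's reversed scan with early return by a collect-then-pick-last decomposition: build the list of all valid stripped models, return its last element or the fallback (alternative, same cost).

-- ===== PORT A =====
-- A's loop over reversed(raw_responses) with early return: recursion over the reversed list.
def resolveGoA (fallback_model : String) : List (List (String × String)) → String
  | [] => fallback_model
  | raw :: rest =>
    match (PySem.Dict.mk raw).get? "model" with
    | some candidate =>
      if PySem.Str.strip candidate ≠ "" then PySem.Str.strip candidate
      else resolveGoA fallback_model rest
    | none => resolveGoA fallback_model rest

def resolve_model_from_raw_py (raw_responses : List (List (String × String))) (fallback_model : String) : String :=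
  resolveGoA fallback_model raw_responses.reverse

-- ===== PORT B =====
-- the comprehension's per-element filter/map: a valid stripped model, or nothing
def extractModel (raw : List (String × String)) : Option String :=
  match (PySem.Dict.mk raw).get? "model" with
  | some c => let s := PySem.Str.strip c; if s ≠ "" then some s else none
  | none => none

def resolve_model_from_raw_py_alt (raw_responses : List (List (String × String))) (fallback_model : String) : String :=
  ((raw_responses.filterMap extractModel).getLast?).getD fallback_model

-- ===== PRECONDITION & SPEC =====
def Spec_resolve_model_from_raw_py (raw_responses : List (List (String × String))) (fallback_model : String) (out : String) : Prop := out = resolve_model_from_raw_py_alt raw_responses fallback_model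
instance (raw_responses : List (List (String × String))) (fallback_model : String) (out : String) : Decidable (Spec_resolve_model_from_raw_py raw_responses fallback_model out) := by unfold Spec_resolve_model_from_raw_py; infer_instance

-- ===== CLAIM =====
def Claim_equal_resolve_model_from_raw_py : Prop := ∀ (raw_responses : List (List (String × String))) (fallback_model : String), Dom_resolve_model_from_raw_py raw_responses fallback_model → Spec_resolve_model_from_raw_py raw_responses fallback_model (resolve_model_from_raw_py raw_responses fallback_model)

-- ===== LEMMAS AND PROOFS =====
-- A's early-return scan returns the FIRST extracted model of its input (or the fallback)
theorem resolveGoA_eq_head (ys : List (List (String × String))) (fb : String) :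
    resolveGoA fb ys = ((ys.filterMap extractModel).head?).getD fb := by
  induction ys with
  | nil => rfl
  | cons raw rest ih =>
    cases h : (PySem.Dict.mk raw).get? "model" with
    | none =>
      have he : extractModel raw = none := by simp [extractModel, h]
      rw [List.filterMap_cons, he]
      simp only [resolveGoA]
      rw [h]
      exact ih
    | some c =>
      by_cases hs : PySem.Str.strip c = ""
      · have he : extractModel raw = none := by simp [extractModel, h, hs]
        rw [List.filterMap_cons, he]
        simp only [resolveGoA]
        rw [h]
        simp only []
        rw [if_neg (by simp [hs])]
        exact ih
      · have he : extractModel raw = some (PySem.Str.strip c) := by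
          simp [extractModel, h, hs]
        rw [List.filterMap_cons, he]
        simp only [resolveGoA]
        rw [h]
        simp only []
        rw [if_pos hs]
        simp

-- ===== VERDICT =====
theorem resolve_model_from_raw_py_spec : Claim_equal_resolve_model_from_raw_py := by
  intro rr fb _
  unfold Spec_resolve_model_from_raw_py resolve_model_from_raw_py resolve_model_from_raw_py_alt
  rw [resolveGoA_eq_head, List.filterMap_reverse, List.head?_reverse]
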